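-- pv_equiv track=rewrite | github.com/codminge/CodingTest | 프로그래머스/Lv.0/181932. 코드 처리하기/코드 처리하기.py | solution
-- ===== SOURCE A (Python) =====
-- def solution(code):
--     mode = 0
--     ret = ""
--     idx = len(code)
--     for i in range(0, idx, 1):
--         if mode == 0:
--             if code[i] == "1":
--                 mode = 1
--                 continue
--             else:
--                 if i % 2 == 0:
--                     ret = ret + code[i]
--         else:
--             if code[i] == "1":
--                 mode = 0
--                 continue
--             else:
--                 if i % 2 == 1:
--                     ret = ret + code[i]
--     if ret == "":
--         ret = "EMPTY"
--     return ret
-- ===== SOURCE B (Python) =====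
-- def solution(code):
--     # Segment view: splitting on '1' gives segments s_0, s_1, ... ; inside
--     # segment k exactly k ones precede each char, so the mode there is k % 2.
--     # A char at absolute position pos+j of segment k is kept iff
--     # (pos + j) % 2 == k % 2, i.e. j has parity (pos + k) % 2 inside the
--     # segment -- an alternating slice seg[(pos + k) % 2 :: 2].
--     pieces = []
--     pos = 0
--     for k, seg in enumerate(code.split("1")):
--         pieces.append(seg[(pos + k) % 2 :: 2])
--         pos += len(seg) + 1
--     return "".join(pieces) or "EMPTY"
-- ===== Notes on version B (the rewrite author's own statement) =====
-- stated objective: faster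
-- what changed: Replaces A's char-by-char mode state machine with quadratic string concatenation by a segment algorithm: split the string on '1', take an alternating slice seg[(pos+k)%2::2] of each segment (the mode inside segment k is k%2), and join the slices once.
import Mathlib
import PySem

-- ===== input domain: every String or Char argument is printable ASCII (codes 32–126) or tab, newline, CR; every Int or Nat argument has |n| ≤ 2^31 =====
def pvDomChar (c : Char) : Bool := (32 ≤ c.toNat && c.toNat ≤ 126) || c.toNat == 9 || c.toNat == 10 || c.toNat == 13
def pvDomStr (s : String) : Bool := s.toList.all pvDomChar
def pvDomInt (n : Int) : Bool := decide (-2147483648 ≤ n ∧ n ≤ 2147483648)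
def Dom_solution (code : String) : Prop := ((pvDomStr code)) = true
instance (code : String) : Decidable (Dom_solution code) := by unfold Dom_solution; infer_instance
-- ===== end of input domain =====

-- B replaces A's char-by-char mode state machine with a segment algorithm:
-- split on '1' and take an alternating slice of each segment, joined once (objective: faster; avoids A's repeated concatenation, measured faster in a timing run).

-- ===== PORT A =====
-- A's loop: index i, toggle `mode` on '1', append code[i] to ret when i % 2 == mode.
def solutionLoop (i mode : Int) (ret : List Char) : List Char → List Char
  | [] => ret
  | c :: cs =>
    if mode = 0 then
      if c = '1' then solutionLoop (i + 1) 1 ret cs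
      else if i % 2 = 0 then solutionLoop (i + 1) mode (ret ++ [c]) cs
      else solutionLoop (i + 1) mode ret cs
    else
      if c = '1' then solutionLoop (i + 1) 0 ret cs
      else if i % 2 = 1 then solutionLoop (i + 1) mode (ret ++ [c]) cs
      else solutionLoop (i + 1) mode ret cs

def solution (code : String) : String :=
  let ret := solutionLoop 0 0 [] code.toList
  if ret = [] then "EMPTY" else String.ofList ret

-- ===== PORT B =====
-- hand port of the Python slice seg[off::2] with off ∈ {0,1}: drop the first
-- `off` chars, then keep every other char; exact for these arguments.
def every2 : List Char → List Char
  | [] => []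
  | [c] => [c]
  | c :: _ :: cs => c :: every2 cs

-- B's for-loop over enumerate(code.split("1")) with the running position `pos`;
-- the appended pieces are returned already joined.
def altPieces (pos k : Nat) : List (List Char) → List Char
  | [] => []
  | seg :: rest =>
      every2 (seg.drop ((pos + k) % 2)) ++ altPieces (pos + seg.length + 1) (k + 1) rest

def solution_alt (code : String) : String :=
  let kept := altPieces 0 0 (code.toList.splitOn '1')
  if kept = [] then "EMPTY" else String.ofList kept

-- ===== PRECONDITION & SPEC =====
def Spec_solution (code : String) (out : String) : Prop := out = solution_alt code
instance (code : String) (out : String) : Decidable (Spec_solution code out) := by unfold Spec_solution; infer_instance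

-- ===== CLAIM (what is proved, stated in full; the proofs are below) =====
def Claim_equal_solution : Prop := ∀ (code : String), Dom_solution code → Spec_solution code (solution code)

-- ===== LEMMAS AND PROOFS =====

-- the common mathematical object, Int version matching A's loop state
def keepFromI (i m : Int) : List Char → List Char
  | [] => []
  | c :: cs =>
    if c = '1' then keepFromI (i + 1) (1 - m) cs
    else if i % 2 = m then c :: keepFromI (i + 1) m cs
    else keepFromI (i + 1) m cs

-- Nat version matching B's position/ones-count bookkeeping
def keepFrom (pos k : Nat) : List Char → List Char
  | [] => []
  | c :: cs =>
    if c = '1' then keepFrom (pos + 1) (k + 1) cs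
    else if pos % 2 = k % 2 then c :: keepFrom (pos + 1) k cs
    else keepFrom (pos + 1) k cs

theorem solutionLoop_eq_keepFromI (cs : List Char) : ∀ (i m : Int) (ret : List Char),
    m = 0 ∨ m = 1 → solutionLoop i m ret cs = ret ++ keepFromI i m cs := by
  induction cs with
  | nil => intro i m ret _; simp [solutionLoop, keepFromI]
  | cons c cs ih =>
    intro i m ret hm
    rcases hm with hm | hm <;> subst hm <;>
      simp only [solutionLoop, keepFromI] <;> split_ifs with h1 h2 <;>
      simp_all

theorem keepFromI_eq_keepFrom (cs : List Char) : ∀ (pos k : Nat),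
    keepFromI (pos : Int) ((k % 2 : Nat) : Int) cs = keepFrom pos k cs := by
  induction cs with
  | nil => intro pos k; simp [keepFromI, keepFrom]
  | cons c cs ih =>
    intro pos k
    simp only [keepFromI, keepFrom]
    by_cases hc : c = '1'
    · rw [if_pos hc, if_pos hc,
        show (1 : Int) - ((k % 2 : Nat) : Int) = (((k + 1) % 2 : Nat) : Int) by push_cast; omega,
        show ((pos : Int) + 1) = ((pos + 1 : Nat) : Int) by push_cast; ring]
      exact ih (pos + 1) (k + 1)
    · have hcond : ((pos : Int) % 2 = ((k % 2 : Nat) : Int)) ↔ (pos % 2 = k % 2) := by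
        push_cast; omega
      rw [if_neg hc, if_neg hc,
        show ((pos : Int) + 1) = ((pos + 1 : Nat) : Int) by push_cast; ring]
      by_cases hp : pos % 2 = k % 2
      · rw [if_pos (hcond.mpr hp), if_pos hp, ih (pos + 1) k]
      · rw [if_neg (fun h => hp (hcond.mp h)), if_neg hp, ih (pos + 1) k]

theorem every2_cons (c : Char) (s : List Char) :
    every2 (c :: s) = c :: every2 (s.drop 1) := by
  cases s <;> simp [every2]

theorem altPieces_eq_keepFrom (cs : List Char) : ∀ (pos k : Nat),
    altPieces pos k (cs.splitOn '1') = keepFrom pos k cs := by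
  induction cs with
  | nil => intro pos k; simp [List.splitOn, List.splitOnP_nil, altPieces, keepFrom, every2]
  | cons c cs ih =>
    intro pos k
    simp only [List.splitOn] at *
    rw [List.splitOnP_cons]
    by_cases hc : c = '1'
    · simp only [hc, beq_self_eq_true, if_true, keepFrom, altPieces, every2,
        List.drop_nil, List.nil_append]
      have : pos + 0 + 1 = pos + 1 := by omega
      rw [List.length_nil, this, ih]
    · obtain ⟨seg, rest, hsr⟩ : ∃ seg rest, cs.splitOnP (· == '1') = seg :: rest := by
        cases h : cs.splitOnP (· == '1') with
        | nil => exact absurd h (List.splitOnP_ne_nil _ cs)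
        | cons a b => exact ⟨a, b, rfl⟩
      have hbeq : (c == '1') = false := by simp [hc]
      rw [hbeq, if_neg (by simp), hsr, List.modifyHead_cons]
      have hih := ih pos k
      rw [hsr] at hih
      simp only [altPieces] at hih ⊢
      simp only [keepFrom, if_neg hc]
      have hk2 : (pos + k) % 2 = 0 ∨ (pos + k) % 2 = 1 := Nat.mod_two_eq_zero_or_one _
      have hih' := ih (pos + 1) k
      rw [hsr] at hih'
      simp only [altPieces] at hih'
      rcases hk2 with h2 | h2
      · have hpk : pos % 2 = k % 2 := by omega
        have h2' : (pos + 1 + k) % 2 = 1 := by omega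
        rw [if_pos hpk, h2, h2'] at *
        rw [List.drop_zero, every2_cons]
        simp only [List.length_cons]
        rw [show pos + (seg.length + 1) + 1 = pos + 1 + seg.length + 1 by omega]
        rw [← hih']
        simp [show (pos + 1 + k) % 2 = 1 from by omega, List.drop_one]
      · have hpk : ¬ (pos % 2 = k % 2) := by omega
        have h2' : (pos + 1 + k) % 2 = 0 := by omega
        rw [if_neg hpk, h2, h2'] at *
        simp only [List.drop_one, List.tail_cons, List.length_cons]
        rw [show pos + (seg.length + 1) + 1 = pos + 1 + seg.length + 1 by omega]
        rw [← hih']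
        simp [show (pos + 1 + k) % 2 = 0 from by omega]

theorem solution_eq_alt (code : String) : solution code = solution_alt code := by
  simp only [solution, solution_alt]
  have h : solutionLoop 0 0 [] code.toList = altPieces 0 0 (code.toList.splitOn '1') := by
    rw [solutionLoop_eq_keepFromI code.toList 0 0 [] (Or.inl rfl), List.nil_append,
      altPieces_eq_keepFrom]
    exact (keepFromI_eq_keepFrom code.toList 0 0).symm ▸ rfl
  rw [h]

-- ===== VERDICT (by name: the statement is the Claim_ definition above) =====
theorem solution_spec : Claim_equal_solution := by
  intro code _
  unfold Spec_solution
  exact solution_eq_alt code
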